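-- pv_equiv track=rewrite | github.com/piercefreeman/waymark | core-python/src/rappel_core/cli/benchmark.py | _median_from_counts
-- ===== SOURCE A (Python) =====
-- def _median_from_counts(counts: dict[int, int]) -> int:
--     total = sum(counts.values())
--     if total <= 0:
--         return 0
--     threshold = (total + 1) // 2
--     running = 0
--     for size in sorted(counts):
--         running += counts[size]
--         if running >= threshold:
--             return size
--     return 0
-- ===== SOURCE B (Python) =====
-- def _median_from_counts(counts: dict[int, int]) -> int:
--     total = sum(counts.values())
--     if total <= 0:
--         return 0
--     threshold = (total + 1) // 2
--     best = None
--     for size in counts: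
--         cum = sum(counts[k] for k in counts if k <= size)
--         if cum >= threshold and (best is None or size < best):
--             best = size
--     return best if best is not None else 0
-- ===== Notes on version B (the rewrite author's own statement) =====
-- stated objective: alternative
-- what changed: B drops the sort-then-prefix-scan entirely: for each key it computes the cumulative weight of keys <= it directly and returns the smallest key whose cumulative weight reaches the threshold, tracked with a running minimum over an unordered scan.
import Mathlib
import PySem

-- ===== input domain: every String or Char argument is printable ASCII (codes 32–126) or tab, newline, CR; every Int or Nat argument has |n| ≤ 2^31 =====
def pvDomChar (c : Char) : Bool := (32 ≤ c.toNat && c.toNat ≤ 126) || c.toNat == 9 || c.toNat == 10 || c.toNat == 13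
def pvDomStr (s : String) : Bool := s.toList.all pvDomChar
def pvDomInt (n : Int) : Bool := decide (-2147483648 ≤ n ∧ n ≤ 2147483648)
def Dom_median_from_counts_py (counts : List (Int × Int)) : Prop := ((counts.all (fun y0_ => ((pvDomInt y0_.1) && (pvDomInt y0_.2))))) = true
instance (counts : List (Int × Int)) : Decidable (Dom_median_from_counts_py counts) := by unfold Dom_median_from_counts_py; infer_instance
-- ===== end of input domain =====

-- B replaces A's sort-then-prefix-scan by a sort-free search for the smallest key whose
-- cumulative weight reaches the threshold (objective: alternative algorithm, same results).

-- ===== PORT A =====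
-- counts[k] (dict lookup; every use below looks up a key of the dict, so the 0 default is unreachable)
def pvGet (counts : List (Int × Int)) (k : Int) : Int :=
  ((counts.find? (fun p => p.1 == k)).map Prod.snd).getD 0

-- the 'for size in sorted(counts): running += counts[size]; if running >= threshold: return size' loop
def pvALoop (counts : List (Int × Int)) (t : Int) : List Int → Int → Int
  | [], _ => 0
  | k :: ks, running =>
      let r := running + pvGet counts k
      if t ≤ r then k else pvALoop counts t ks r

def median_from_counts_py (counts : List (Int × Int)) : Int :=
  let total := (counts.map Prod.snd).sum
  if total ≤ 0 then 0
  else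
    let threshold := PySem.Int.floordiv (total + 1) 2
    pvALoop counts threshold (PySem.List.sorted (counts.map Prod.fst) (fun x => x) false) 0

-- ===== PORT B =====
-- sum(counts[k] for k in counts if k <= x)
def pvCum (counts : List (Int × Int)) (x : Int) : Int :=
  (((counts.map Prod.fst).filter (fun k => decide (k ≤ x))).map (pvGet counts)).sum

def median_from_counts_py_alt (counts : List (Int × Int)) : Int :=
  let total := (counts.map Prod.snd).sum
  if total ≤ 0 then 0
  else
    let threshold := PySem.Int.floordiv (total + 1) 2
    let best := counts.foldl (fun (best : Option Int) p =>
      if threshold ≤ pvCum counts p.1 then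
        match best with
        | none => some p.1
        | some b => if p.1 < b then some p.1 else some b
      else best) none
    match best with
    | none => 0
    | some b => b

-- ===== PRECONDITION & SPEC =====
-- Pre_ excludes association lists with duplicate keys: the Python argument is a dict, which cannot
-- contain them, so A is never called on such inputs.
def Pre_median_from_counts_py (counts : List (Int × Int)) : Prop :=
  (counts.map Prod.fst).Nodup
instance (counts : List (Int × Int)) : Decidable (Pre_median_from_counts_py counts) := by
  unfold Pre_median_from_counts_py; infer_instance
def pvWitness_median_from_counts_py : (List (Int × Int)) := [(1, 2), (3, 4)]

def Spec_median_from_counts_py (counts : List (Int × Int)) (out : Int) : Prop := out = median_from_counts_py_alt counts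
instance (counts : List (Int × Int)) (out : Int) : Decidable (Spec_median_from_counts_py counts out) := by unfold Spec_median_from_counts_py; infer_instance

-- ===== CLAIM (what is proved, stated in full; the proofs are below) =====
def Claim_equal_median_from_counts_py : Prop := ∀ (counts : List (Int × Int)), Dom_median_from_counts_py counts → Pre_median_from_counts_py counts → Spec_median_from_counts_py counts (median_from_counts_py counts)

-- ===== LEMMAS AND PROOFS =====

-- B's min-tracking fold computes the minimum of the keys passing the threshold test
lemma pv_bfold (counts : List (Int × Int)) (t : Int) :
    ∀ (l : List Int) (b : Option Int),
      l.foldl (fun (best : Option Int) k =>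
        if t ≤ pvCum counts k then
          match best with
          | none => some k
          | some x => if k < x then some k else some x
        else best) b
      = match b with
        | none => (l.filter (fun k => decide (t ≤ pvCum counts k))).min?
        | some x => some ((l.filter (fun k => decide (t ≤ pvCum counts k))).foldl min x) := by
  intro l
  induction l with
  | nil => intro b; cases b <;> simp [List.min?]
  | cons k ks ih =>
    intro b
    cases b with
    | none =>
      by_cases h : t ≤ pvCum counts k
      · simp [h, ih, List.min?]
      · simp [h, ih]
    | some x =>
      by_cases h : t ≤ pvCum counts k
      · have hmin : (if k < x then some k else some x) = some (min x k) := by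
          split_ifs with hkx <;> simp [min_def] <;> omega
        simp [h, ih, hmin]
      · simp [h, ih]

-- A's running-sum loop returns the first (sorted) key whose cumulative weight reaches t
lemma pv_aloop (counts : List (Int × Int)) (t : Int) :
    ∀ (rest : List Int) (running : Int),
      (∀ pre k rest2, rest = pre ++ k :: rest2 →
          running + (((pre.map (pvGet counts)).sum) + pvGet counts k) = pvCum counts k) →
      pvALoop counts t rest running
        = ((rest.filter (fun k => decide (t ≤ pvCum counts k))).head?).getD 0 := by
  intro rest
  induction rest with
  | nil => intro running _; simp [pvALoop]
  | cons k ks ih =>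
    intro running H
    have hk : running + pvGet counts k = pvCum counts k := by
      have := H [] k ks rfl; simpa using this
    by_cases h : t ≤ running + pvGet counts k
    · have hP : decide (t ≤ pvCum counts k) = true := by rw [← hk]; simpa using h
      simp [pvALoop, h, hP]
    · have hP : decide (t ≤ pvCum counts k) = true ↔ False := by
        rw [← hk]; simpa using h
      have hrec := ih (running + pvGet counts k) (by
        intro pre k' rest2 hks
        have := H (k :: pre) k' rest2 (by rw [hks, List.cons_append])
        simp only [List.map_cons, List.sum_cons] at this
        linarith)
      simp [pvALoop, h, hP, hrec]

-- in a strictly increasing arrangement, the weight accumulated before a key plus its own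
-- weight is exactly the cumulative weight of the keys ≤ it
lemma pv_prefix (counts : List (Int × Int)) (hnd : (counts.map Prod.fst).Nodup)
    (pre rest2 : List Int) (k : Int)
    (hsplit : PySem.List.sorted (counts.map Prod.fst) (fun x => x) false = pre ++ k :: rest2) :
    ((pre.map (pvGet counts)).sum) + pvGet counts k = pvCum counts k := by
  have hperm : (PySem.List.sorted (counts.map Prod.fst) (fun x => x) false).Perm (counts.map Prod.fst) :=
    PySem.List.sorted_perm _ _ _
  have hle : (PySem.List.sorted (counts.map Prod.fst) (fun x => x) false).Pairwise (· ≤ ·) :=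
    PySem.List.sorted_pairwise _ _
  have hnd' : (PySem.List.sorted (counts.map Prod.fst) (fun x => x) false).Nodup :=
    hperm.nodup_iff.mpr hnd
  have hlt : (PySem.List.sorted (counts.map Prod.fst) (fun x => x) false).Pairwise (· < ·) :=
    (hle.and hnd').imp (fun h => lt_of_le_of_ne h.1 h.2)
  rw [hsplit] at hlt hperm
  obtain ⟨hp1, hp2, hp3⟩ := List.pairwise_append.mp hlt
  have hpre : pre.filter (fun k' => decide (k' ≤ k)) = pre :=
    List.filter_eq_self.mpr (fun a ha => by
      have := hp3 a ha k (List.mem_cons_self ..)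
      simpa using le_of_lt this)
  have hrest : rest2.filter (fun k' => decide (k' ≤ k)) = [] :=
    List.filter_eq_nil_iff.mpr (fun a ha hfa => by
      have h1 : k < a := (List.pairwise_cons.mp hp2).1 a ha
      have h2 : a ≤ k := by simpa using hfa
      omega)
  have hfil : ((pre ++ k :: rest2).filter (fun k' => decide (k' ≤ k))) = pre ++ [k] := by
    rw [List.filter_append, List.filter_cons, hpre, hrest]
    simp
  have hpc : ((counts.map Prod.fst).filter (fun k' => decide (k' ≤ k))).Perm (pre ++ [k]) := by
    rw [← hfil]; exact (hperm.filter _).symm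
  have : pvCum counts k = (((pre ++ [k]).map (pvGet counts)).sum) := by
    unfold pvCum
    exact (hpc.map (pvGet counts)).sum_eq
  rw [this]
  simp

-- the head of the sorted filtered list is the minimum of the unsorted filtered list
lemma pv_head_min (s l : List Int) (hperm : s.Perm l) (hle : s.Pairwise (· ≤ ·))
    (p : Int → Bool) : (s.filter p).head? = (l.filter p).min? := by
  have hp : (s.filter p).Perm (l.filter p) := hperm.filter p
  have hps : (s.filter p).Pairwise (· ≤ ·) := hle.filter p
  cases hsp : s.filter p with
  | nil =>
    rw [hsp] at hp
    rw [hp.symm.eq_nil]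
    simp
  | cons m rest =>
    rw [hsp] at hp hps
    have hmem : m ∈ l.filter p := hp.subset (List.mem_cons_self ..)
    have hbound : ∀ b ∈ l.filter p, m ≤ b := by
      intro b hb
      rcases List.mem_cons.mp (hp.symm.subset hb) with h | h
      · omega
      · exact (List.pairwise_cons.mp hps).1 b h
    rw [List.head?_cons, Eq.comm, List.min?_eq_some_iff]
    exact ⟨hmem, hbound⟩

-- ===== VERDICT (by name: the statement is the Claim_ definition above) =====
theorem median_from_counts_py_spec : Claim_equal_median_from_counts_py := by
  intro counts _ hpre
  unfold Spec_median_from_counts_py median_from_counts_py median_from_counts_py_alt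
  by_cases htot : (counts.map Prod.snd).sum ≤ 0
  · simp [htot]
  · simp only [htot, if_false]
    set t := PySem.Int.floordiv ((counts.map Prod.snd).sum + 1) 2 with ht
    have hA := pv_aloop counts t (PySem.List.sorted (counts.map Prod.fst) (fun x => x) false) 0
      (by intro pre k rest2 hsplit
          have := pv_prefix counts hpre pre rest2 k hsplit
          linarith)
    rw [hA]
    have hBmap : counts.foldl (fun (best : Option Int) p =>
        if t ≤ pvCum counts p.1 then
          match best with
          | none => some p.1
          | some b => if p.1 < b then some p.1 else some b
        else best) none
      = (counts.map Prod.fst).foldl (fun (best : Option Int) k =>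
        if t ≤ pvCum counts k then
          match best with
          | none => some k
          | some b => if k < b then some k else some b
        else best) none := by rw [List.foldl_map]
    rw [hBmap, pv_bfold]
    rw [pv_head_min _ _ (PySem.List.sorted_perm _ _ _) (PySem.List.sorted_pairwise _ _)]
    cases hmin : ((counts.map Prod.fst).filter (fun k => decide (t ≤ pvCum counts k))).min? with
    | none => simp
    | some m => simp
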